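-- pv_equiv track=rewrite | github.com/Eatapples15/allerte_bollettino_basilicata | main.py | analizza_riga_rischi
-- ===== SOURCE A (Python) =====
-- def get_risk_score(color):
--     scores = {"green": 0, "yellow": 1, "orange": 2, "red": 3}
--     return scores.get(color, 0)
--
-- def parse_alert_color(text):
--     if not text: return "green"
--     t = str(text).upper()
--     if "ROSS" in t: return "red"
--     if "ARANC" in t: return "orange"
--     if "GIALL" in t: return "yellow"
--     return "green"
--
-- def analizza_riga_rischi(celle):
--     labels_rischio = {1: "Idrogeologico", 2: "Temporali", 3: "Idraulico"}
--     max_score = 0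
--     final_color = "green"
--     descrizione_parts = []
--
--     for i in range(1, len(celle)):
--         if i > 3: break
--         col_text = str(celle[i]).replace("\n", " ").strip()
--         colore = parse_alert_color(col_text)
--         score = get_risk_score(colore)
--
--         if score > 0:
--             tipo = labels_rischio.get(i, "Generico")
--             if score > max_score:
--                 max_score = score
--                 final_color = colore
--                 descrizione_parts = [tipo]
--             elif score == max_score:
--                 descrizione_parts.append(tipo)
--
--     if max_score == 0: return "green", "Ordinaria"
--     desc_finale = " + ".join(descrizione_parts)
--     return final_color, desc_finale
-- ===== SOURCE B (Python) =====
-- def get_risk_score(color):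
--     scores = {"green": 0, "yellow": 1, "orange": 2, "red": 3}
--     return scores.get(color, 0)
--
-- def parse_alert_color(text):
--     if not text: return "green"
--     t = str(text).upper()
--     if "ROSS" in t: return "red"
--     if "ARANC" in t: return "orange"
--     if "GIALL" in t: return "yellow"
--     return "green"
--
-- def analizza_riga_rischi(celle):
--     labels = ["Idrogeologico", "Temporali", "Idraulico"]
--     entries = []
--     for i in range(1, min(4, len(celle))):
--         colore = parse_alert_color(str(celle[i]).replace("\n", " ").strip())
--         entries.append((get_risk_score(colore), labels[i - 1]))
--     max_score = max((s for s, _ in entries), default=0)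
--     if max_score == 0:
--         return "green", "Ordinaria"
--     final_color = {1: "yellow", 2: "orange", 3: "red"}.get(max_score, "green")
--     return final_color, " + ".join(t for s, t in entries if s == max_score)
-- ===== Notes on version B (the rewrite author's own statement) =====
-- stated objective: alternative
-- what changed: Replaced A's single pass with a running max/color/parts accumulator by a build-then-reduce decomposition: collect (score, tipo) entries for cells 1-3, take the max score (default 0), map it back to its color, and filter the entries for the tied tipos.
import Mathlib
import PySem

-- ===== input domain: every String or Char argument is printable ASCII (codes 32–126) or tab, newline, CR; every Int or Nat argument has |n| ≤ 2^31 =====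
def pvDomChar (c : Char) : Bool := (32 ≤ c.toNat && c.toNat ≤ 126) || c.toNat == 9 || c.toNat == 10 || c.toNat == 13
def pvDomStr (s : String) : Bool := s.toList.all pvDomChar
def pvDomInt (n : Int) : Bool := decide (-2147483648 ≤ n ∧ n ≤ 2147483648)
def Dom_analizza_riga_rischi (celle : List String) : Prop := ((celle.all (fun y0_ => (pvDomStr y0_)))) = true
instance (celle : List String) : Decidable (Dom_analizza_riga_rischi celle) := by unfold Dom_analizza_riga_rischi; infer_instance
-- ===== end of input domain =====

-- B replaces A's running max/color/parts accumulator with a build-entries-then-reduce-and-filter decomposition (objective: alternative).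


-- ===== PORT A =====
def get_risk_score (color : String) : Int :=
  PySem.Dict.getD
    (PySem.Dict.ofList [("green", (0 : Int)), ("yellow", 1), ("orange", 2), ("red", 3)])
    color 0

def parse_alert_color (text : String) : String :=
  if text = "" then "green" else
  let t := PySem.Str.upper text
  if PySem.Str.isIn "ROSS" t then "red" else
  if PySem.Str.isIn "ARANC" t then "orange" else
  if PySem.Str.isIn "GIALL" t then "yellow" else
  "green"

-- shared per-cell processing: parse_alert_color(str(celle[i]).replace("\n", " ").strip())
-- (pyGetD with default "" is exact here: every index either loop uses is in range)
def cellColore (celle : List String) (i : Int) : String :=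
  parse_alert_color (PySem.Str.strip (PySem.Str.replace (PySem.List.pyGetD celle i "") "\n" " "))

-- A's loop over the index list of range(1, len(celle)), with 'if i > 3: break' as an early return
def loopA (celle : List String) :
    List Int → Int × String × List String → Int × String × List String
  | [], st => st
  | i :: rest, (max_score, final_color, descrizione_parts) =>
    if i > 3 then (max_score, final_color, descrizione_parts)
    else
      let colore := cellColore celle i
      let score := get_risk_score colore
      let st :=
        if score > 0 then
          let tipo := PySem.Dict.getD
            (PySem.Dict.ofList [((1 : Int), "Idrogeologico"), (2, "Temporali"), (3, "Idraulico")])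
            i "Generico"
          if score > max_score then (score, colore, [tipo])
          else if score = max_score then (max_score, final_color, descrizione_parts ++ [tipo])
          else (max_score, final_color, descrizione_parts)
        else (max_score, final_color, descrizione_parts)
      loopA celle rest st

def analizza_riga_rischi (celle : List String) : String × String :=
  let st := loopA celle (PySem.List.pyRange 1 (PySem.List.len celle) 1) (0, "green", [])
  if st.1 = 0 then ("green", "Ordinaria")
  else (st.2.1, PySem.Str.join " + " st.2.2)

-- ===== PORT B =====
def analizza_riga_rischi_alt (celle : List String) : String × String :=
  let labels := ["Idrogeologico", "Temporali", "Idraulico"]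
  let entries := (PySem.List.pyRange 1 (min 4 (PySem.List.len celle)) 1).map
    (fun i => (get_risk_score (cellColore celle i), PySem.List.pyGetD labels (i - 1) "Generico"))
  let max_score := PySem.List.maxD (entries.map (·.1)) (fun s => s) 0
  if max_score = 0 then ("green", "Ordinaria")
  else
    let final_color := PySem.Dict.getD
      (PySem.Dict.ofList [((1 : Int), "yellow"), (2, "orange"), (3, "red")]) max_score "green"
    (final_color, PySem.Str.join " + " ((entries.filter (fun e => e.1 = max_score)).map (·.2)))

-- ===== PRECONDITION & SPEC =====
def Spec_analizza_riga_rischi (celle : List String) (out : String × String) : Prop := out = analizza_riga_rischi_alt celle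
instance (celle : List String) (out : String × String) : Decidable (Spec_analizza_riga_rischi celle out) := by unfold Spec_analizza_riga_rischi; infer_instance

-- ===== CLAIM (what is proved, stated in full; the proofs are below) =====
def Claim_equal_analizza_riga_rischi : Prop := ∀ (celle : List String), Dom_analizza_riga_rischi celle → Spec_analizza_riga_rischi celle (analizza_riga_rischi celle)

-- ===== LEMMAS AND PROOFS =====

-- one iteration of A's loop, as a standalone function of the index and the parsed colour
def stepA (i : Int) (colore : String) :
    Int × String × List String → Int × String × List String
  | (max_score, final_color, descrizione_parts) =>
    let score := get_risk_score colore
    if score > 0 then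
      let tipo := PySem.Dict.getD
        (PySem.Dict.ofList [((1 : Int), "Idrogeologico"), (2, "Temporali"), (3, "Idraulico")])
        i "Generico"
      if score > max_score then (score, colore, [tipo])
      else if score = max_score then (max_score, final_color, descrizione_parts ++ [tipo])
      else (max_score, final_color, descrizione_parts)
    else (max_score, final_color, descrizione_parts)

theorem loopA_cons (celle : List String) (i : Int) (rest : List Int)
    (st : Int × String × List String) (hi : ¬ i > 3) :
    loopA celle (i :: rest) st = loopA celle rest (stepA i (cellColore celle i) st) := by
  obtain ⟨ms, fc, parts⟩ := st
  simp only [loopA, stepA, if_neg hi]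

theorem loopA_nil (celle : List String) (st : Int × String × List String) :
    loopA celle [] st = st := rfl

theorem loopA_tail (celle : List String) (n : Int) (st : Int × String × List String) :
    loopA celle (PySem.List.pyRange 4 n 1) st = st := by
  rcases lt_or_ge 4 n with h | h
  · rw [PySem.List.pyRange_one_cons h]
    obtain ⟨ms, fc, parts⟩ := st
    simp [loopA]
  · rw [PySem.List.pyRange_one_eq_nil h]
    exact loopA_nil _ _

theorem parse_mem (t : String) :
    parse_alert_color t = "red" ∨ parse_alert_color t = "orange" ∨
    parse_alert_color t = "yellow" ∨ parse_alert_color t = "green" := by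
  simp only [parse_alert_color]
  split_ifs <;> simp

theorem cellColore_mem (celle : List String) (i : Int) :
    cellColore celle i = "red" ∨ cellColore celle i = "orange" ∨
    cellColore celle i = "yellow" ∨ cellColore celle i = "green" := by
  unfold cellColore; exact parse_mem _

-- ===== VERDICT (by name: the statement is the Claim_ definition above) =====
theorem analizza_riga_rischi_spec : Claim_equal_analizza_riga_rischi := by
  intro celle _
  show analizza_riga_rischi celle = analizza_riga_rischi_alt celle
  match celle with
  | [] => decide
  | [a] => rfl
  | [a, b] =>
      unfold analizza_riga_rischi analizza_riga_rischi_alt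
      have h2 : PySem.List.len [a, b] = 2 := by simp [PySem.List.len_eq]
      have hr : PySem.List.pyRange 1 2 1 = [1] := by decide
      rw [h2, hr, (by omega : min (4 : Int) 2 = 2), hr, loopA_cons _ _ _ _ (by norm_num), loopA_nil]
      rcases cellColore_mem [a, b] 1 with h1 | h1 | h1 | h1 <;>
        simp only [List.map_cons, List.map_nil, h1] <;> decide
  | [a, b, c] =>
      unfold analizza_riga_rischi analizza_riga_rischi_alt
      have h3 : PySem.List.len [a, b, c] = 3 := by simp [PySem.List.len_eq]
      have hr : PySem.List.pyRange 1 3 1 = [1, 2] := by decide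
      rw [h3, hr, (by omega : min (4 : Int) 3 = 3), hr, loopA_cons _ _ _ _ (by norm_num), loopA_cons _ _ _ _ (by norm_num), loopA_nil]
      rcases cellColore_mem [a, b, c] 1 with h1 | h1 | h1 | h1 <;>
        rcases cellColore_mem [a, b, c] 2 with h2 | h2 | h2 | h2 <;>
        simp only [List.map_cons, List.map_nil, h1, h2] <;> decide
  | a :: b :: c :: d :: rest =>
      unfold analizza_riga_rischi analizza_riga_rischi_alt
      have hlen : (4 : Int) ≤ PySem.List.len (a :: b :: c :: d :: rest) := by
        simp [PySem.List.len_eq]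
        omega
      have hr : PySem.List.pyRange 1 (PySem.List.len (a :: b :: c :: d :: rest)) 1 =
          1 :: 2 :: 3 :: PySem.List.pyRange 4 (PySem.List.len (a :: b :: c :: d :: rest)) 1 := by
        rw [PySem.List.pyRange_one_cons (by omega), PySem.List.pyRange_one_cons (by omega),
            PySem.List.pyRange_one_cons (by omega)]
        norm_num
      have hm : min 4 (PySem.List.len (a :: b :: c :: d :: rest)) = 4 := by omega
      rw [hr, hm, loopA_cons _ _ _ _ (by norm_num), loopA_cons _ _ _ _ (by norm_num),
          loopA_cons _ _ _ _ (by norm_num), loopA_tail]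
      have hm4 : PySem.List.pyRange 1 4 1 = [1, 2, 3] := rfl
      rw [hm4]
      rcases cellColore_mem (a :: b :: c :: d :: rest) 1 with h1 | h1 | h1 | h1 <;>
        rcases cellColore_mem (a :: b :: c :: d :: rest) 2 with h2 | h2 | h2 | h2 <;>
        rcases cellColore_mem (a :: b :: c :: d :: rest) 3 with h3 | h3 | h3 | h3 <;>
        simp only [List.map_cons, List.map_nil, h1, h2, h3] <;> decide
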